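-- pv_equiv track=rewrite | github.com/DynAAMPG/dynaampg | utils.py | vnat_get_class_label
-- ===== SOURCE A (Python) =====
-- vnat_map = {
--             'streaming': ['nonvpn_netflix', 'nonvpn_youtube', 'nonvpn_vimeo'],
--             'voip': ['nonvpn_voip', 'nonvpn_skype'],
--             'file_transfer': ['nonvpn_rsync', 'nonvpn_sftp', 'nonvpn_scp'],
--             'p2p': ['nonvpn_ssh', 'nonvpn_rdp'],
--             'vpn_streaming': ['vpn_netflix', 'vpn_youtube', 'vpn_vimeo'],
--             'vpn_voip': ['vpn_voip', 'vpn_skype'],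
--             'vpn_file_transfer': ['vpn_rsync', 'vpn_sftp', 'vpn_scp'],
--             'vpn_p2p': ['vpn_ssh', 'vpn_rdp']
-- }
--
-- def vnat_get_class_label(file):
--     cls = ''
--     label = file.split('.')[0]
--     for m_key, m_values in vnat_map.items():
--         for value in m_values:
--             if label[:len(value)] == value:
--                 cls = m_key
--                 break
--     return cls
-- ===== SOURCE B (Python) =====
-- # B decomposes the label structurally: strip the 'nonvpn_'/'vpn_' tag, then
-- # look the remaining app prefix up in a flat app->category table; correct
-- # because every prefix in vnat_map is exactly tag + app name, the class is
-- # tag-dependent category, and no app name is a prefix of another (so at most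
-- # one table row matches and first-match equals A's last-match).
-- _apps = {
--     'netflix': 'streaming', 'youtube': 'streaming', 'vimeo': 'streaming',
--     'voip': 'voip', 'skype': 'voip',
--     'rsync': 'file_transfer', 'sftp': 'file_transfer', 'scp': 'file_transfer',
--     'ssh': 'p2p', 'rdp': 'p2p',
-- }
--
-- def vnat_get_class_label(file):
--     label = file.split('.')[0]
--     if label.startswith('nonvpn_'):
--         rest, pre = label[7:], ''
--     elif label.startswith('vpn_'):
--         rest, pre = label[4:], 'vpn_'
--     else:
--         return ''
--     for app, cat in _apps.items():
--         if rest.startswith(app):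
--             return pre + cat
--     return ''
-- ===== Notes on version B (the rewrite author's own statement) =====
-- stated objective: alternative
-- what changed: Instead of scanning all 19 full prefixes, B strips the 'nonvpn_'/'vpn_' tag from the label and looks the remaining app prefix up in a flat app->category table, returning on the first match (correct since app names are pairwise non-prefix).
import Mathlib
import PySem

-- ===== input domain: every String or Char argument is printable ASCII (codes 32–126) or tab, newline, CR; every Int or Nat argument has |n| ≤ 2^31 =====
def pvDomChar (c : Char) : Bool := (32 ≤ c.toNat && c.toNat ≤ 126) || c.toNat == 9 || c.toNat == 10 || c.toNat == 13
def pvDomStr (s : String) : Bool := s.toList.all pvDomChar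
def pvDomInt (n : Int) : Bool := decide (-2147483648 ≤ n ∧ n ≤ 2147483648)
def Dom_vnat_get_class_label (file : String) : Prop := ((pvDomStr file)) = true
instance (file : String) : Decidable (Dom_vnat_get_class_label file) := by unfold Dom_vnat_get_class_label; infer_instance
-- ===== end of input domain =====

-- B strips the 'nonvpn_'/'vpn_' tag off the label and looks the remaining app
-- prefix up in a flat app->category table (objective: alternative algorithm).

-- the module constant vnat_map (a dict of lists, ported as an association list)
def vnatMap : List (String × List String) :=
  [("streaming", ["nonvpn_netflix", "nonvpn_youtube", "nonvpn_vimeo"]),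
   ("voip", ["nonvpn_voip", "nonvpn_skype"]),
   ("file_transfer", ["nonvpn_rsync", "nonvpn_sftp", "nonvpn_scp"]),
   ("p2p", ["nonvpn_ssh", "nonvpn_rdp"]),
   ("vpn_streaming", ["vpn_netflix", "vpn_youtube", "vpn_vimeo"]),
   ("vpn_voip", ["vpn_voip", "vpn_skype"]),
   ("vpn_file_transfer", ["vpn_rsync", "vpn_sftp", "vpn_scp"]),
   ("vpn_p2p", ["vpn_ssh", "vpn_rdp"])]

-- ===== PORT A =====
-- inner loop: 'for value in m_values: if label[:len(value)] == value: cls = m_key; break'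
def vnatInner (label mKey cls : String) : List String → String
  | [] => cls
  | v :: rest =>
      if PySem.Str.slice label none (some (PySem.Str.len v)) == v then mKey
      else vnatInner label mKey cls rest

def vnat_get_class_label (file : String) : String :=
  let cls := ""
  let label := ((PySem.Str.split? file ".").getD []).headD ""
  vnatMap.foldl (fun cls kv => vnatInner label kv.1 cls kv.2) cls

-- ===== PORT B =====
-- _apps = {'netflix': 'streaming', ...}: the flat app -> category table
def appMap : List (String × String) :=
  [("netflix", "streaming"), ("youtube", "streaming"), ("vimeo", "streaming"),
   ("voip", "voip"), ("skype", "voip"),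
   ("rsync", "file_transfer"), ("sftp", "file_transfer"), ("scp", "file_transfer"),
   ("ssh", "p2p"), ("rdp", "p2p")]

-- 'for app, cat in _apps.items(): if rest.startswith(app): return pre + cat'
def scanApps (rest pre : String) : List (String × String) → String
  | [] => ""
  | (app, cat) :: t =>
      if PySem.Str.startswith rest app then pre ++ cat else scanApps rest pre t

def vnat_get_class_label_alt (file : String) : String :=
  let label := ((PySem.Str.split? file ".").getD []).headD ""
  if PySem.Str.startswith label "nonvpn_" then
    scanApps (PySem.Str.slice label (some 7) none) "" appMap
  else if PySem.Str.startswith label "vpn_" then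
    scanApps (PySem.Str.slice label (some 4) none) "vpn_" appMap
  else ""

-- ===== PRECONDITION & SPEC =====
def Spec_vnat_get_class_label (file : String) (out : String) : Prop := out = vnat_get_class_label_alt file
instance (file : String) (out : String) : Decidable (Spec_vnat_get_class_label file out) := by unfold Spec_vnat_get_class_label; infer_instance

-- ===== CLAIM =====
def Claim_equal_vnat_get_class_label : Prop := ∀ (file : String), Dom_vnat_get_class_label file → Spec_vnat_get_class_label file (vnat_get_class_label file)

-- ===== LEMMAS AND PROOFS =====

-- A's slice comparison label[:len(v)] == v is exactly startswith(label, v)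
lemma condA_eq (label v : String) :
    (PySem.Str.slice label none (some (PySem.Str.len v)) == v) = PySem.Str.startswith label v := by
  rw [Bool.eq_iff_iff, beq_iff_eq]
  rw [show (PySem.Str.slice label none (some (PySem.Str.len v)) = v) ↔
      ((PySem.Str.slice label none (some (PySem.Str.len v))).toList = v.toList) from
    ⟨fun h => by rw [h], fun h => by ext1; exact h⟩]
  simp [PySem.Chars.startswith_iff, PySem.List.slice_to_natCast, List.prefix_iff_eq_take]
  constructor <;> intro h <;> simp [h]

lemma sw_iff (l p : String) :
    PySem.Str.startswith l p = true ↔ p.toList <+: l.toList := by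
  simp [PySem.Chars.startswith_iff]

-- A's inner loop (first match breaks) returns k iff some value matches
lemma inner_eq (label k cls : String) (vs : List String) :
    vnatInner label k cls vs =
      if vs.any (fun v => PySem.Str.startswith label v) then k else cls := by
  induction vs with
  | nil => rfl
  | cons v rest ih =>
      rw [vnatInner, condA_eq, List.any_cons]
      cases h : PySem.Str.startswith label v <;> simp [ih]

-- a last-wins pass over one group with a constant key equals the 'any' test
lemma lastwins (label k cls : String) (vs : List String) :
    vs.foldl (fun c v => if PySem.Str.startswith label v then k else c) cls =
      if vs.any (fun v => PySem.Str.startswith label v) then k else cls := by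
  induction vs generalizing cls with
  | nil => rfl
  | cons v rest ih =>
      rw [List.foldl_cons, ih, List.any_cons]
      cases h : PySem.Str.startswith label v <;>
        cases h2 : rest.any (fun v => PySem.Str.startswith label v) <;> simp

lemma foldl_flatMap' {α β γ : Type} (g : α → List β) (f : γ → β → γ) (init : γ) (l : List α) :
    (l.flatMap g).foldl f init = l.foldl (fun acc x => (g x).foldl f acc) init := by
  induction l generalizing init with
  | nil => rfl
  | cons x t ih => simp [List.flatMap_cons, List.foldl_append, ih]

-- A's nested scan equals a flat last-wins scan over (value, key) pairs
def pairs19 : List (String × String) :=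
  vnatMap.flatMap (fun kv => kv.2.map (fun v => (v, kv.1)))

lemma A_flat (label : String) :
    vnatMap.foldl (fun cls kv => vnatInner label kv.1 cls kv.2) "" =
      pairs19.foldl (fun c vk => if PySem.Str.startswith label vk.1 then vk.2 else c) "" := by
  rw [pairs19, foldl_flatMap']
  have hf : (fun (cls : String) (kv : String × List String) => vnatInner label kv.1 cls kv.2)
      = (fun cls kv => (kv.2.map (fun v => (v, kv.1))).foldl
          (fun c vk => if PySem.Str.startswith label vk.1 then vk.2 else c) cls) := by
    funext cls kv
    rw [inner_eq, List.foldl_map, lastwins]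
  rw [hf]

-- the 19 (value, key) pairs are the tagged app table
lemma pairs_eq :
    pairs19 = (appMap.map (fun p => ("nonvpn_" ++ p.1, p.2)))
      ++ (appMap.map (fun p => ("vpn_" ++ p.1, "vpn_" ++ p.2))) := by decide

-- prefix plumbing
lemma sw_of_sw_append (l pre s : String) (h : PySem.Str.startswith l (pre ++ s) = true) :
    PySem.Str.startswith l pre = true := by
  rw [sw_iff] at h ⊢
  rw [String.toList_append] at h
  exact (List.prefix_append pre.toList s.toList).trans h

lemma prefix_append_drop {α : Type} {p s l : List α} (hp : p <+: l) :
    (p ++ s <+: l) ↔ s <+: l.drop p.length := by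
  obtain ⟨t, rfl⟩ := hp
  rw [List.drop_left]
  exact ⟨fun h => (List.prefix_append_right_inj p).mp h,
         fun h => (List.prefix_append_right_inj p).mpr h⟩

lemma sw_nonvpn (l s : String) (h : PySem.Str.startswith l "nonvpn_" = true) :
    PySem.Str.startswith l ("nonvpn_" ++ s)
      = PySem.Str.startswith (PySem.Str.slice l (some 7) none) s := by
  have hp := (sw_iff l "nonvpn_").mp h
  rw [Bool.eq_iff_iff, sw_iff, sw_iff, String.toList_append]
  have hs : (PySem.Str.slice l (some 7) none).toList = l.toList.drop 7 := by
    have hb : (PySem.Str.slice l (some 7) none).toList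
        = PySem.List.slice l.toList (some 7) none := by simp
    rw [hb, show ((7 : Int)) = ((7 : Nat) : Int) from by norm_num,
      PySem.List.slice_from_natCast]
  have h2 := prefix_append_drop (s := s.toList) hp
  rw [show ("nonvpn_" : String).toList.length = 7 from by decide] at h2
  rw [hs]
  exact h2

lemma sw_vpn (l s : String) (h : PySem.Str.startswith l "vpn_" = true) :
    PySem.Str.startswith l ("vpn_" ++ s)
      = PySem.Str.startswith (PySem.Str.slice l (some 4) none) s := by
  have hp := (sw_iff l "vpn_").mp h
  rw [Bool.eq_iff_iff, sw_iff, sw_iff, String.toList_append]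
  have hs : (PySem.Str.slice l (some 4) none).toList = l.toList.drop 4 := by
    have hb : (PySem.Str.slice l (some 4) none).toList
        = PySem.List.slice l.toList (some 4) none := by simp
    rw [hb, show ((4 : Int)) = ((4 : Nat) : Int) from by norm_num,
      PySem.List.slice_from_natCast]
  have h2 := prefix_append_drop (s := s.toList) hp
  rw [show ("vpn_" : String).toList.length = 4 from by decide] at h2
  rw [hs]
  exact h2

lemma head_pfx {α : Type} {a : α} {p l : List α} (h : a :: p <+: l) : l.head? = some a := by
  obtain ⟨t, rfl⟩ := h; rfl

lemma no_vpn_of_nonvpn (l s : String) (hn : PySem.Str.startswith l "nonvpn_" = true) :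
    PySem.Str.startswith l ("vpn_" ++ s) = false := by
  by_contra h
  rw [Bool.not_eq_false, sw_iff, String.toList_append] at h
  rw [sw_iff] at hn
  have h1 := head_pfx (show 'v' :: ("pn_".toList ++ s.toList) <+: l.toList from h)
  have h2 := head_pfx (show 'n' :: "onvpn_".toList <+: l.toList from hn)
  rw [h1] at h2
  simp at h2

-- a fold whose condition never fires returns its initial value
lemma foldl_if_false {α β : Type} (l : List α) (c : α → Bool) (f : α → β) (i : β)
    (h : ∀ a ∈ l, c a = false) :
    l.foldl (fun acc a => if c a then f a else acc) i = i := by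
  induction l with
  | nil => rfl
  | cons x t ih =>
      rw [List.foldl_cons, h x (List.mem_cons_self), if_neg (by simp)]
      exact ih (fun a ha => h a (List.mem_cons_of_mem x ha))

-- no app name is a prefix of another app name with a different category
lemma app_keys : ∀ p ∈ appMap, ∀ q ∈ appMap,
    (p.1.toList <+: q.1.toList ∨ q.1.toList <+: p.1.toList) → p.2 = q.2 := by decide

lemma uniq (rest : String) (p q : String × String) (hp : p ∈ appMap) (hq : q ∈ appMap)
    (h1 : PySem.Str.startswith rest p.1 = true) (h2 : PySem.Str.startswith rest q.1 = true) :
    p.2 = q.2 := by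
  rw [sw_iff] at h1 h2
  apply app_keys p hp q hq
  rcases le_total p.1.toList.length q.1.toList.length with hle | hle
  · exact Or.inl (List.prefix_of_prefix_length_le h1 h2 hle)
  · exact Or.inr (List.prefix_of_prefix_length_le h2 h1 hle)

lemma stayput (rest pre i : String) (ps : List (String × String))
    (h : ∀ q ∈ ps, PySem.Str.startswith rest q.1 = true → pre ++ q.2 = i) :
    ps.foldl (fun c p => if PySem.Str.startswith rest p.1 then pre ++ p.2 else c) i = i := by
  induction ps with
  | nil => rfl
  | cons x t ih =>
      rw [List.foldl_cons]
      cases hx : PySem.Str.startswith rest x.1 with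
      | false =>
          rw [if_neg (by simp [hx])]
          exact ih (fun q hq => h q (List.mem_cons_of_mem x hq))
      | true =>
          rw [if_pos (by simp [hx]), h x (List.mem_cons_self) hx]
          exact ih (fun q hq => h q (List.mem_cons_of_mem x hq))

-- last-match-wins over a table with pairwise non-prefix keys equals first-match
lemma last_eq_first (rest pre : String) (ps : List (String × String))
    (h : ∀ p ∈ ps, ∀ q ∈ ps, PySem.Str.startswith rest p.1 = true →
        PySem.Str.startswith rest q.1 = true → p.2 = q.2) :
    ps.foldl (fun c p => if PySem.Str.startswith rest p.1 then pre ++ p.2 else c) ""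
      = scanApps rest pre ps := by
  induction ps with
  | nil => rfl
  | cons x t ih =>
      obtain ⟨app, cat⟩ := x
      rw [List.foldl_cons, scanApps]
      cases hx : PySem.Str.startswith rest app with
      | false =>
          rw [if_neg (by simp [hx]), if_neg (by simp [hx])]
          exact ih (fun p hp q hq => h p (List.mem_cons_of_mem _ hp) q (List.mem_cons_of_mem _ hq))
      | true =>
          rw [if_pos (by simp [hx]), if_pos (by simp [hx])]
          apply stayput
          intro q hq hqsw
          have := h q (List.mem_cons_of_mem _ hq) (app, cat) (List.mem_cons_self) hqsw hx
          rw [this]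

-- ===== VERDICT =====
theorem vnat_get_class_label_spec : Claim_equal_vnat_get_class_label := by
  intro file _
  unfold Spec_vnat_get_class_label vnat_get_class_label vnat_get_class_label_alt
  simp only []
  set l := ((PySem.Str.split? file ".").getD []).headD "" with hl
  rw [A_flat, pairs_eq, List.foldl_append, List.foldl_map, List.foldl_map]
  by_cases hn : PySem.Str.startswith l "nonvpn_" = true
  · rw [if_pos hn]
    rw [foldl_if_false appMap (fun p => PySem.Str.startswith l ("vpn_" ++ p.1))
      (fun p => "vpn_" ++ p.2) _ (fun p _ => no_vpn_of_nonvpn l p.1 hn)]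
    have hcond : (fun (c : String) (p : String × String) =>
        if PySem.Str.startswith l ("nonvpn_" ++ p.1) then p.2 else c)
        = (fun c p => if PySem.Str.startswith (PySem.Str.slice l (some 7) none) p.1
            then "" ++ p.2 else c) := by
      funext c p
      rw [sw_nonvpn l p.1 hn]
      simp
    rw [hcond]
    exact last_eq_first _ "" appMap (fun p hp q hq => uniq _ p q hp hq)
  · rw [if_neg hn]
    have hnons : ∀ p ∈ appMap, PySem.Str.startswith l ("nonvpn_" ++ p.1) = false := by
      intro p _
      by_contra h
      rw [Bool.not_eq_false] at h
      exact hn (sw_of_sw_append l "nonvpn_" p.1 h)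
    by_cases hv : PySem.Str.startswith l "vpn_" = true
    · rw [if_pos hv]
      rw [foldl_if_false appMap (fun p => PySem.Str.startswith l ("nonvpn_" ++ p.1))
        (fun p => p.2) _ hnons]
      have hcond : (fun (c : String) (p : String × String) =>
          if PySem.Str.startswith l ("vpn_" ++ p.1) then "vpn_" ++ p.2 else c)
          = (fun c p => if PySem.Str.startswith (PySem.Str.slice l (some 4) none) p.1
              then "vpn_" ++ p.2 else c) := by
        funext c p
        rw [sw_vpn l p.1 hv]
      rw [hcond]
      exact last_eq_first _ "vpn_" appMap (fun p hp q hq => uniq _ p q hp hq)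
    · rw [if_neg hv]
      have hvs : ∀ p ∈ appMap, PySem.Str.startswith l ("vpn_" ++ p.1) = false := by
        intro p _
        by_contra h
        rw [Bool.not_eq_false] at h
        exact hv (sw_of_sw_append l "vpn_" p.1 h)
      rw [foldl_if_false appMap (fun p => PySem.Str.startswith l ("nonvpn_" ++ p.1))
        (fun p => p.2) _ hnons]
      rw [foldl_if_false appMap (fun p => PySem.Str.startswith l ("vpn_" ++ p.1))
        (fun p => "vpn_" ++ p.2) _ hvs]
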